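-- pv_equiv track=rewrite | github.com/hite4044/HuoDouReloaded | sprites/titles.py | space
-- ===== SOURCE A (Python) =====
-- SPACE_MAP: dict[int, int] = {
--     64: 0xE006,
--     32: 0xE005,
--     16: 0xE004,
--     8: 0xE003,
--     4: 0xE002,
--     2: 0xE001,
--     1: 0xE000,
-- }
--
-- def space(size: int) -> str:
--     space_string = ""
--     left = size
--     for width, char_index in SPACE_MAP.items():
--         if left >= width:
--             space_string += chr(char_index)
--             left -= width
--             if left == 0:
--                 break
--     return space_string
-- ===== SOURCE B (Python) =====
-- def space(size: int) -> str:
--     if size <= 0: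
--         return ""
--     return _rec(min(size, 127))
--
--
-- def _rec(m: int) -> str:
--     # chars for bits of m//2 sit one position higher, so shift their codes up by 1,
--     # then append the base char 0xE000 if m is odd
--     if m == 0:
--         return ""
--     higher = "".join(chr(ord(c) + 1) for c in _rec(m // 2))
--     return higher + (chr(0xE000) if m % 2 else "")
-- ===== Notes on version B (the rewrite author's own statement) =====
-- stated objective: alternative
-- what changed: Replaces A's greedy descending subtract-and-break loop over a width table by a bottom-up halving recursion: recurse on n//2, shift every returned char code up by one, and append the base char when n is odd (after clamping to min(size,127) and returning "" for size<=0).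
import Mathlib
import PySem

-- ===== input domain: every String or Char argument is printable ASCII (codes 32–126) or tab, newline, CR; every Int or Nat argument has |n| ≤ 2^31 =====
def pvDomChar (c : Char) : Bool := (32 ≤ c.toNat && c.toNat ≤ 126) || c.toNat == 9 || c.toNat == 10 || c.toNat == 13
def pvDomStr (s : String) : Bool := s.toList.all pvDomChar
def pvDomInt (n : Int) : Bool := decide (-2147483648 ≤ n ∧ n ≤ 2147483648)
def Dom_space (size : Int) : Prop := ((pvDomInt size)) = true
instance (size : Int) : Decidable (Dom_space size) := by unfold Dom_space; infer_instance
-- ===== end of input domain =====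

-- B replaces A's greedy subtract-and-break loop by a bottom-up halving recursion that
-- shifts the recursive result's char codes up by one (objective: alternative).

-- ===== PORT A =====
def SPACE_MAP : List (Int × Int) :=
  [(64, 0xE006), (32, 0xE005), (16, 0xE004), (8, 0xE003), (4, 0xE002), (2, 0xE001), (1, 0xE000)]

-- the for-loop with its early 'break', step for step; chr(c) = Char.ofNat c.toNat (exact: all codes here < 0x110000)
def spaceLoop : List (Int × Int) → String → Int → String
  | [], space_string, _ => space_string
  | (width, char_index) :: rest, space_string, left =>
    if left ≥ width then
      let space_string' := space_string ++ String.mk [Char.ofNat char_index.toNat]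
      let left' := left - width
      if left' = 0 then space_string' else spaceLoop rest space_string' left'
    else spaceLoop rest space_string left

def space (size : Int) : String := spaceLoop SPACE_MAP "" size

-- ===== PORT B =====
-- _rec's argument is always a nonnegative int ≤ 127 here, so it is carried as a Nat
-- (Nat / and % agree with Python's // and % on nonnegative ints); the fuel argument
-- only makes the halving recursion structural and is never exhausted (7 halvings of
-- any m ≤ 127 reach 0).
def spaceRec : Nat → Nat → String
  | 0, _ => ""
  | fuel + 1, m =>
    if m = 0 then ""
    else
      let higher := String.mk ((spaceRec fuel (m / 2)).toList.map
        (fun c => Char.ofNat (c.toNat + 1)))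
      higher ++ (if m % 2 ≠ 0 then String.mk [Char.ofNat 0xE000] else "")

def space_alt (size : Int) : String :=
  if size ≤ 0 then "" else spaceRec 7 (min size 127).toNat

-- ===== PRECONDITION & SPEC =====
def Spec_space (size : Int) (out : String) : Prop := out = space_alt size
instance (size : Int) (out : String) : Decidable (Spec_space size out) := by unfold Spec_space; infer_instance

-- ===== CLAIM (what is proved, stated in full; the proofs are below) =====
def Claim_equal_space : Prop := ∀ (size : Int), Dom_space size → Spec_space size (space size)

-- ===== LEMMAS AND PROOFS =====

-- small sizes: a finite check
set_option maxRecDepth 8192 in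
theorem space_eq_small : ∀ n : Nat, n ≤ 127 → space (n : Int) = space_alt (n : Int) := by decide

theorem space_eq_nonpos (size : Int) (h : size ≤ 0) : space size = space_alt size := by
  have hA : space size = "" := by
    simp only [space, SPACE_MAP, spaceLoop]
    rw [if_neg (by omega), if_neg (by omega), if_neg (by omega), if_neg (by omega),
        if_neg (by omega), if_neg (by omega), if_neg (by omega)]
  have hB : space_alt size = "" := by
    simp only [space_alt]
    rw [if_pos h]
  rw [hA, hB]

theorem space_eq_big (size : Int) (h : 127 ≤ size) : space size = space_alt size := by
  have hA : space size = space (127 : Int) := by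
    simp only [space, SPACE_MAP, spaceLoop]
    rw [if_pos (by omega), if_neg (by omega), if_pos (by omega), if_neg (by omega),
        if_pos (by omega), if_neg (by omega), if_pos (by omega), if_neg (by omega),
        if_pos (by omega), if_neg (by omega), if_pos (by omega), if_neg (by omega),
        if_pos (by omega)]
    by_cases h0 : size - 64 - 32 - 16 - 8 - 4 - 2 - 1 = 0
    · rw [if_pos h0]; decide
    · rw [if_neg h0]; decide
  have hB : space_alt size = space_alt (127 : Int) := by
    simp only [space_alt]
    rw [if_neg (by omega), if_neg (by omega)]
    have : min size 127 = min (127 : Int) 127 := by omega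
    rw [this]
  rw [hA, hB]; decide

-- ===== VERDICT (by name: the statement is the Claim_ definition above) =====
theorem space_spec : Claim_equal_space := by
  intro size _
  unfold Spec_space
  by_cases h : size ≤ 0
  · exact (space_eq_nonpos size h)
  · by_cases h2 : 127 ≤ size
    · exact (space_eq_big size h2)
    · have hn : size = ((size.toNat : Nat) : Int) := by omega
      rw [hn]
      exact (space_eq_small size.toNat (by omega))
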